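-- pv_equiv track=rewrite | github.com/aromyang/algorithm-baekjoon-programmers | 프로그래머스/lv2/131127. 할인 행사/할인 행사.py | solution
-- ===== SOURCE A (Python) =====
-- from collections import Counter
--
-- def solution(want, number, discount):
--     wants = dict(zip(want, number))
--     cnt = 0
--
--     for i in range(len(discount) - 9):
--         cnts = Counter(discount[i:i+10])
--         for k, v in wants.items():
--             if k not in cnts or v > cnts[k]:
--                 cnt -= 1
--                 break
--         cnt += 1
--
--     return cnt
-- ===== SOURCE B (Python) =====
-- def solution(want, number, discount):
--     # key-major prefix-sum scan instead of a Counter per window.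
--     # A window satisfies a wanted key only if the key actually appears in it,
--     # so the effective per-key requirement is max(v, 1).
--     n = len(discount)
--     wins = n - 9
--     if wins <= 0:
--         return 0
--     needs = {}
--     for k, v in zip(want, number):
--         needs[k] = v if v > 1 else 1
--     good = [True] * wins
--     for k, need in needs.items():
--         if not any(good):
--             break
--         pref = [0]
--         for item in discount:
--             pref.append(pref[-1] + (1 if item == k else 0))
--         good = [g and pref[i + 10] - pref[i] >= need for i, g in enumerate(good)]
--     return sum(good)
-- ===== Notes on version B (the rewrite author's own statement) =====
-- stated objective: faster
-- what changed: Instead of rebuilding a Counter for every 10-day window and scanning the wanted items per window, B makes one key-major pass: for each distinct wanted item it builds a prefix-count array over discount once and marks windows whose prefix difference falls short (the >= threshold clamped to at least 1, since a wanted key must appear in the window), then counts the windows still marked good.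
import Mathlib
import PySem

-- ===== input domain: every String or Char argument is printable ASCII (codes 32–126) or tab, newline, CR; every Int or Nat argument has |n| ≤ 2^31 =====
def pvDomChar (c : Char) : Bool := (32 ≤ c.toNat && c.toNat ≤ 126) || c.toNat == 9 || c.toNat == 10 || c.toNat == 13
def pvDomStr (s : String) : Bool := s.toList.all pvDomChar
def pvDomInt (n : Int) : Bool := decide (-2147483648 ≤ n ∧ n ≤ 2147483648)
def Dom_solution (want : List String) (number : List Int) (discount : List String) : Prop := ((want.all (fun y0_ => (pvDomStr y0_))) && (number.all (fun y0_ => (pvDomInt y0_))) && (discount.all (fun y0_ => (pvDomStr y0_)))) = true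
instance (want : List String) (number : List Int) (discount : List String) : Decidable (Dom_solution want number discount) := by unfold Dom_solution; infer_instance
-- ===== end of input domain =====

-- B replaces A's per-window Counter rebuild by a key-major pass with prefix sums (measured constant-factor speedup).


-- ===== PORT A =====
-- inner 'for k, v in wants.items(): if …: cnt -= 1; break' loop of A
def aCheck : List (String × Int) → PySem.Dict String Int → Int → Int
  | [], _, cnt => cnt
  | (k, v) :: rest, cnts, cnt =>
    if !(cnts.contains k) || decide (v > cnts.getD k 0) then cnt - 1
    else aCheck rest cnts cnt

def solution (want : List String) (number : List Int) (discount : List String) : Int :=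
  let wants : PySem.Dict String Int :=
    (want.zip number).foldl (fun d kv => d.insert kv.1 kv.2) PySem.Dict.empty
  (PySem.List.pyRange 0 ((discount.length : Int) - 9) 1).foldl
    (fun cnt i =>
      let cnts := PySem.Dict.counter (PySem.List.slice discount (some i) (some (i + 10)))
      (aCheck wants.items cnts cnt) + 1) 0

-- ===== PORT B =====
-- 'pref = [0]; for item in discount: pref.append(pref[-1] + (1 if item == k else 0))'
def bPref (k : String) (discount : List String) : List Int :=
  discount.foldl (fun p item => p ++ [PySem.List.pyGetD p (-1) 0 + (if item == k then 1 else 0)]) [0]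

-- 'good = [g and pref[i+10] - pref[i] >= need for i, g in enumerate(good)]'
def bUpdate (discount : List String) (g : List Bool) (kn : String × Int) : List Bool :=
  (PySem.List.enumerate g 0).map
    (fun ib => ib.2 && decide (PySem.List.pyGetD (bPref kn.1 discount) (ib.1 + 10) 0
                               - PySem.List.pyGetD (bPref kn.1 discount) ib.1 0 ≥ kn.2))

-- 'for k, need in needs.items(): if not any(good): break; …'
def bLoop (discount : List String) : List (String × Int) → List Bool → List Bool
  | [], g => g
  | kn :: K, g => if g.any id = false then g else bLoop discount K (bUpdate discount g kn)

def solution_alt (want : List String) (number : List Int) (discount : List String) : Int :=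
  let n : Int := (discount.length : Int)
  let wins : Int := n - 9
  if wins ≤ 0 then 0
  else
    let needs : PySem.Dict String Int :=
      (want.zip number).foldl (fun d kv => d.insert kv.1 (if kv.2 > 1 then kv.2 else 1)) PySem.Dict.empty
    let good := bLoop discount needs.items (List.replicate wins.toNat true)
    (good.map (fun b => if b then (1 : Int) else 0)).sum

-- ===== PRECONDITION & SPEC =====
def Spec_solution (want : List String) (number : List Int) (discount : List String) (out : Int) : Prop := out = solution_alt want number discount
instance (want : List String) (number : List Int) (discount : List String) (out : Int) : Decidable (Spec_solution want number discount out) := by unfold Spec_solution; infer_instance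

-- ===== CLAIM (what is proved, stated in full; the proofs are below) =====
def Claim_equal_solution : Prop := ∀ (want : List String) (number : List Int) (discount : List String), Dom_solution want number discount → Spec_solution want number discount (solution want number discount)

-- ===== LEMMAS AND PROOFS =====

-- A's inner loop returns cnt when every wanted pair passes, cnt - 1 otherwise
theorem aCheck_eq (items : List (String × Int)) (cnts : PySem.Dict String Int) (cnt : Int) :
    aCheck items cnts cnt =
      if items.all (fun kv => cnts.contains kv.1 && decide (kv.2 ≤ cnts.getD kv.1 0)) then cnt else cnt - 1 := by
  induction items with
  | nil => simp [aCheck]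
  | cons kv rest ih =>
    obtain ⟨k, v⟩ := kv
    simp only [aCheck, ih, List.all_cons]
    have hneg : (cnts.contains k && decide (v ≤ cnts.getD k 0))
        = !(!(cnts.contains k) || decide (v > cnts.getD k 0)) := by
      cases cnts.contains k <;> by_cases h2 : v ≤ cnts.getD k 0 <;>
        simp [not_lt.mpr, lt_of_not_ge, *]
    simp only [hneg]
    cases hc : (!(cnts.contains k) || decide (v > cnts.getD k 0)) <;>
      cases hr : (rest.all fun kv => cnts.contains kv.1 && decide (kv.2 ≤ cnts.getD kv.1 0)) <;>
        simp

-- A's outer fold is a 0/1 sum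
theorem foldl_pm (l : List Int) (f : Int → Bool) (init : Int) :
    l.foldl (fun c i => (if f i then c else c - 1) + 1) init
      = init + (l.map (fun i => if f i then (1 : Int) else 0)).sum := by
  induction l generalizing init with
  | nil => simp
  | cons x xs ih =>
    simp only [List.foldl_cons, List.map_cons, List.sum_cons, ih]
    split <;> ring

-- the needs dict is the wants dict with values clamped up to 1
theorem items_foldl_insert_map (l : List (String × Int)) (d1 d2 : PySem.Dict String Int)
    (h : d2.items = d1.items.map (fun kv => (kv.1, if kv.2 > 1 then kv.2 else 1))) :
    (l.foldl (fun d kv => d.insert kv.1 (if kv.2 > 1 then kv.2 else 1)) d2).items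
      = (l.foldl (fun d kv => d.insert kv.1 kv.2) d1).items.map (fun kv => (kv.1, if kv.2 > 1 then kv.2 else 1)) := by
  induction l generalizing d1 d2 with
  | nil => simpa using h
  | cons kv rest ih =>
    obtain ⟨k, v⟩ := kv
    simp only [List.foldl_cons]
    apply ih
    have hkeys : d2.contains k = d1.contains k := by
      rw [PySem.Dict.contains_eq_decide_mem_keys, PySem.Dict.contains_eq_decide_mem_keys]
      simp only [PySem.Dict.keys, h, List.map_map]
      simp [Function.comp]
    rw [PySem.Dict.items_insert, PySem.Dict.items_insert, hkeys, h]
    by_cases hc : d1.contains k = true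
    · simp only [hc, if_pos, List.map_map]
      apply List.map_congr_left
      intro p _
      by_cases hp : p.1 = k <;> simp [hp]
    · simp [hc]

-- the prefix list is the list of prefix counts
theorem bPref_eq (k : String) (l : List String) :
    bPref k l = (List.range (l.length + 1)).map (fun j => ((l.take j).count k : Int)) := by
  induction l using List.reverseRecOn with
  | nil => simp [bPref]
  | append_singleton l x ih =>
    have hstep : bPref k (l ++ [x])
        = bPref k l ++ [PySem.List.pyGetD (bPref k l) (-1) 0 + (if x == k then 1 else 0)] := by
      simp [bPref, List.foldl_append]
    rw [hstep, ih]
    have hlast : PySem.List.pyGetD ((List.range (l.length + 1)).map (fun j => ((l.take j).count k : Int))) (-1) 0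
        = (l.count k : Int) := by
      rw [List.range_succ, List.map_append]
      simp [PySem.List.pyGetD_neg_one_append_singleton]
    rw [hlast]
    rw [show (l ++ [x]).length + 1 = (l.length + 1) + 1 by simp]
    rw [List.range_succ (n := l.length + 1), List.map_append]
    congr 1
    · apply List.map_congr_left
      intro j hj
      have hj' : j ≤ l.length := by simpa using Nat.lt_succ_iff.mp (List.mem_range.mp hj)
      rw [List.take_append_of_le_length hj']
    · simp only [List.map_cons, List.map_nil]
      congr 1
      rw [List.take_of_length_le (by simp), List.count_append]
      push_cast
      cases hx : x == k <;> simp [hx, List.count_singleton]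

theorem bPref_getD (k : String) (l : List String) (j : Int) (h0 : 0 ≤ j) (h1 : j ≤ (l.length : Int)) :
    PySem.List.pyGetD (bPref k l) j 0 = ((l.take j.toNat).count k : Int) := by
  rw [bPref_eq]
  rw [PySem.List.pyGetD_eq_getElem _ _ h0 (by simp; omega)]
  simp

-- the good list after folding the keys
theorem good_foldl (discount : List String) (K : List (String × Int)) (wins : Int) (hw : 0 < wins)
    (φ : Int → Bool) (g : List Bool) (hg : g = (PySem.List.pyRange 0 wins 1).map φ) :
    bLoop discount K g
      = (PySem.List.pyRange 0 wins 1).map (fun j => φ j &&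
          K.all (fun kn => decide (PySem.List.pyGetD (bPref kn.1 discount) (j + 10) 0
                                   - PySem.List.pyGetD (bPref kn.1 discount) j 0 ≥ kn.2))) := by
  induction K generalizing φ g with
  | nil => simpa using hg
  | cons kn K ih =>
    simp only [bLoop]
    by_cases hany : (g.any id) = false
    · rw [if_pos hany, hg]
      apply List.map_congr_left
      intro j hj
      have hf : φ j = false := by
        have hmem : φ j ∈ g := hg ▸ List.mem_map_of_mem hj
        simpa using List.any_eq_false.mp hany _ hmem
      simp [hf]
    rw [if_neg hany]
    rw [ih (fun j => φ j && decide (PySem.List.pyGetD (bPref kn.1 discount) (j + 10) 0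
                                   - PySem.List.pyGetD (bPref kn.1 discount) j 0 ≥ kn.2)) _ ?_]
    · apply List.map_congr_left
      intro j _
      simp [List.all_cons, Bool.and_assoc]
    · -- bUpdate g kn is the pointwise update of the map
      have hlen : ((g.length : Int)) = wins := by
        rw [hg]; simp [PySem.List.length_pyRange_one]; omega
      rw [bUpdate, PySem.List.enumerate_eq_map_pyRange g false, PySem.List.len, hlen, List.map_map]
      apply List.map_congr_left
      intro j hj
      obtain ⟨hj0, hj1⟩ := PySem.List.mem_pyRange_one.mp hj
      simp only [Function.comp]
      rw [hg, PySem.List.pyGetD_map_pyRange_of_nonneg φ wins j false hj0 hj1]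

-- ===== VERDICT (by name: the statement is the Claim_ definition above) =====
-- per-window, per-key: A's Counter test equals B's prefix-difference test
theorem key_eq (discount : List String) (j : Int) (h0 : 0 ≤ j) (h1 : j < (discount.length : Int) - 9)
    (kv : String × Int) :
    ((PySem.Dict.counter (PySem.List.slice discount (some j) (some (j + 10)))).contains kv.1
      && decide (kv.2 ≤ (PySem.Dict.counter (PySem.List.slice discount (some j) (some (j + 10)))).getD kv.1 0))
    = decide (PySem.List.pyGetD (bPref kv.1 discount) (j + 10) 0
              - PySem.List.pyGetD (bPref kv.1 discount) j 0 ≥ (if kv.2 > 1 then kv.2 else 1)) := by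
  have hsl : PySem.List.slice discount (some j) (some (j + 10))
      = (discount.drop j.toNat).take 10 := by
    rw [PySem.List.slice_toNat discount h0 (by omega)]
    congr 1
    omega
  rw [hsl, PySem.Dict.contains_counter, PySem.Dict.getD_counter, List.contains_eq_mem]
  rw [bPref_getD kv.1 discount (j + 10) (by omega) (by omega),
      bPref_getD kv.1 discount j h0 (by omega)]
  have hsplit : discount.take (j + 10).toNat
      = discount.take j.toNat ++ (discount.drop j.toNat).take 10 := by
    rw [show (j + 10).toNat = j.toNat + 10 by omega, List.take_add]
  rw [hsplit, List.count_append]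
  set a := (discount.take j.toNat).count kv.1 with ha
  set c := ((discount.drop j.toNat).take 10).count kv.1 with hc
  have harith : ((a + c : Nat) : Int) - (a : Int) = (c : Int) := by push_cast; ring
  rw [harith]
  have hpos : (0 < c) ↔ kv.1 ∈ (discount.drop j.toNat).take 10 := List.count_pos_iff
  by_cases hm : kv.1 ∈ (discount.drop j.toNat).take 10 <;>
    by_cases h2 : kv.2 ≤ (c : Int)
  · have h3 := hpos.mpr hm
    simp only [hm, decide_true, h2, Bool.and_self]
    symm; rw [decide_eq_true_iff]; split_ifs <;> omega
  · simp only [hm, decide_true, h2, decide_false, Bool.and_false]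
    symm; rw [decide_eq_false_iff_not]; split_ifs <;> omega
  · have hc0 : c = 0 := Nat.eq_zero_of_not_pos (fun hp => hm (hpos.mp hp))
    simp only [hm, decide_false, Bool.false_and]
    symm; rw [decide_eq_false_iff_not]; split_ifs <;> omega
  · have hc0 : c = 0 := Nat.eq_zero_of_not_pos (fun hp => hm (hpos.mp hp))
    simp only [hm, decide_false, Bool.false_and]
    symm; rw [decide_eq_false_iff_not]; split_ifs <;> omega

theorem solution_spec : Claim_equal_solution := by
  unfold Claim_equal_solution
  intro want number discount _
  unfold Spec_solution
  set wants : PySem.Dict String Int :=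
    (want.zip number).foldl (fun d kv => d.insert kv.1 kv.2) PySem.Dict.empty with hwants
  have hA : solution want number discount
      = (PySem.List.pyRange 0 ((discount.length : Int) - 9)).foldl
          (fun cnt i =>
            (aCheck wants.items
              (PySem.Dict.counter (PySem.List.slice discount (some i) (some (i + 10)))) cnt) + 1) 0 := rfl
  have hB : solution_alt want number discount
      = if ((discount.length : Int) - 9) ≤ 0 then 0 else
          ((bLoop discount
              ((want.zip number).foldl (fun d kv => d.insert kv.1 (if kv.2 > 1 then kv.2 else 1))
                PySem.Dict.empty).items
              (List.replicate ((discount.length : Int) - 9).toNat true)).map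
            (fun b => if b then (1 : Int) else 0)).sum := rfl
  by_cases hw : (discount.length : Int) - 9 ≤ 0
  · rw [hA, hB, if_pos hw, PySem.List.pyRange_one_eq_nil (by omega)]
    rfl
  · replace hw : (0 : Int) < (discount.length : Int) - 9 := by omega
    rw [hA, hB, if_neg (by omega)]
    have hneeds : ((want.zip number).foldl
        (fun d kv => d.insert kv.1 (if kv.2 > 1 then kv.2 else 1)) PySem.Dict.empty).items
        = wants.items.map (fun kv => (kv.1, if kv.2 > 1 then kv.2 else 1)) :=
      items_foldl_insert_map _ PySem.Dict.empty PySem.Dict.empty rfl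
    have hrep : List.replicate ((discount.length : Int) - 9).toNat true
        = (PySem.List.pyRange 0 ((discount.length : Int) - 9)).map (fun _ => true) := by
      rw [List.map_const', PySem.List.length_pyRange_one]
      norm_num
    rw [hneeds, hrep,
        good_foldl discount _ _ hw (fun _ => true) _ rfl]
    simp only [aCheck_eq]
    rw [foldl_pm _ (fun i => wants.items.all fun kv =>
          (PySem.Dict.counter (PySem.List.slice discount (some i) (some (i + 10)))).contains kv.1
            && decide (kv.2 ≤ (PySem.Dict.counter (PySem.List.slice discount (some i) (some (i + 10)))).getD kv.1 0)) 0,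
        zero_add, List.map_map]
    apply congrArg List.sum
    apply List.map_congr_left
    intro j hj
    obtain ⟨hj0, hj1⟩ := PySem.List.mem_pyRange_one.mp hj
    simp only [List.all_map, Function.comp, Bool.true_and]
    have hall := List.all_congr (rfl : wants.items = wants.items)
      (fun kv => key_eq discount j hj0 hj1 kv)
    simp only [hall]
    rfl
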